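-- pv_equiv track=rewrite | github.com/finallly/testObfuscator | example_2.py | swing
-- ===== SOURCE A (Python) =====
-- def swing(a):
-- 	max_ = 0
-- 	min_ = 0
-- 	for i in range(len(a)):
-- 		if a[i] > max_:
-- 			max_ = a[i]
-- 		if a[i] < min_:
-- 			min_ = a[i]
-- 	return max_ - min_
-- ===== SOURCE B (Python) =====
-- def swing(a):
--     vals = sorted(list(a) + [0])
--     return vals[-1] - vals[0]
-- ===== Notes on version B (the rewrite author's own statement) =====
-- stated objective: alternative
-- what changed: Replaces the running max/min index scan with sort-then-endpoints: append the seed 0, sort the candidates, and return last element minus first element.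
import Mathlib
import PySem

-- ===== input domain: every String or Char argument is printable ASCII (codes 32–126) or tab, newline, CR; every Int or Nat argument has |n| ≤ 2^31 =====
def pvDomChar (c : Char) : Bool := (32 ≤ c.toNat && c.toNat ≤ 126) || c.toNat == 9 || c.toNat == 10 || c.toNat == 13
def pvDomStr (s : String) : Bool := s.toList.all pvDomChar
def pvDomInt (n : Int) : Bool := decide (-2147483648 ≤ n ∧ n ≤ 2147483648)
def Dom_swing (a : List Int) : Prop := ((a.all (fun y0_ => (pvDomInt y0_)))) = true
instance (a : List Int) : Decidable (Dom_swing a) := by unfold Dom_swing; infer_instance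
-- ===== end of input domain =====

-- B: sort-then-endpoints — append the seed 0, sort the candidates, return last minus first, instead of A's running max/min scan.


-- ===== PORT A =====
def swing (a : List Int) : Int :=
  let s := a.foldl (fun (s : Int × Int) x =>
    (if x > s.1 then x else s.1, if x < s.2 then x else s.2)) (0, 0)
  s.1 - s.2

-- ===== PORT B =====
-- vals is always nonempty (it contains 0), so Python's vals[-1]/vals[0] never raise; .getD 0 is unreachable.
def swing_alt (a : List Int) : Int :=
  let vals := PySem.List.sorted (a ++ [0]) (fun x => x) false
  (PySem.List.pyGet? vals (-1)).getD 0 - (PySem.List.pyGet? vals 0).getD 0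

-- ===== PRECONDITION & SPEC =====
def Spec_swing (a : List Int) (out : Int) : Prop := out = swing_alt a
instance (a : List Int) (out : Int) : Decidable (Spec_swing a out) := by unfold Spec_swing; infer_instance

-- ===== CLAIM (what is proved, stated in full; the proofs are below) =====
def Claim_equal_swing : Prop := ∀ (a : List Int), Dom_swing a → Spec_swing a (swing a)

-- ===== LEMMAS AND PROOFS =====

lemma pv_fun_eq :
    (fun (s : Int × Int) x => (if x > s.1 then x else s.1, if x < s.2 then x else s.2))
    = (fun (s : Int × Int) x => (max s.1 x, min s.2 x)) := by
  funext s x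
  simp only [max_def, min_def, Prod.mk.injEq]
  constructor <;> split_ifs <;> omega

lemma pv_loopA (a : List Int) : ∀ m n : Int,
    a.foldl (fun (s : Int × Int) x => (max s.1 x, min s.2 x)) (m, n)
    = (a.foldl max m, a.foldl min n) := by
  induction a with
  | nil => intro m n; simp
  | cons x t ih =>
      intro m n
      simp only [List.foldl_cons]
      exact ih (max m x) (min n x)

-- the running max is a member of the seed-extended list and an upper bound of it
lemma pv_foldl_max_spec (a : List Int) : ∀ i : Int,
    a.foldl max i ∈ i :: a ∧ ∀ x ∈ i :: a, x ≤ a.foldl max i := by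
  induction a with
  | nil => intro i; simp
  | cons y t ih =>
      intro i
      obtain ⟨hmem, hub⟩ := ih (max i y)
      simp only [List.foldl_cons]
      refine ⟨?_, ?_⟩
      · rcases List.mem_cons.1 hmem with h | h
        · rcases max_choice i y with hc | hc
          · rw [h, hc]; exact List.mem_cons_self
          · rw [h, hc]; exact List.mem_cons_of_mem _ List.mem_cons_self
        · exact List.mem_cons_of_mem _ (List.mem_cons_of_mem _ h)
      · intro x hx
        have hiy : max i y ≤ t.foldl max (max i y) := hub _ List.mem_cons_self
        rcases List.mem_cons.1 hx with rfl | hx'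
        · exact le_trans (le_max_left _ _) hiy
        · rcases List.mem_cons.1 hx' with rfl | hx''
          · exact le_trans (le_max_right _ _) hiy
          · exact hub _ (List.mem_cons_of_mem _ hx'')

-- the running min is a member of the seed-extended list and a lower bound of it
lemma pv_foldl_min_spec (a : List Int) : ∀ i : Int,
    a.foldl min i ∈ i :: a ∧ ∀ x ∈ i :: a, a.foldl min i ≤ x := by
  induction a with
  | nil => intro i; simp
  | cons y t ih =>
      intro i
      obtain ⟨hmem, hlb⟩ := ih (min i y)
      simp only [List.foldl_cons]
      refine ⟨?_, ?_⟩
      · rcases List.mem_cons.1 hmem with h | h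
        · rcases min_choice i y with hc | hc
          · rw [h, hc]; exact List.mem_cons_self
          · rw [h, hc]; exact List.mem_cons_of_mem _ List.mem_cons_self
        · exact List.mem_cons_of_mem _ (List.mem_cons_of_mem _ h)
      · intro x hx
        have hiy : t.foldl min (min i y) ≤ min i y := hlb _ List.mem_cons_self
        rcases List.mem_cons.1 hx with rfl | hx'
        · exact le_trans hiy (min_le_left _ _)
        · rcases List.mem_cons.1 hx' with rfl | hx''
          · exact le_trans hiy (min_le_right _ _)
          · exact hlb _ (List.mem_cons_of_mem _ hx'')

-- every element of a ≤-sorted list is ≤ its last element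
lemma pv_le_getLast : ∀ (l : List Int), l.Pairwise (fun a b => a ≤ b) →
    ∀ (h : l ≠ []) (x : Int), x ∈ l → x ≤ l.getLast h := by
  intro l
  induction l with
  | nil => intro _ h; exact absurd rfl h
  | cons y t ih =>
      intro hp h x hx
      rcases List.mem_cons.1 hx with rfl | hx'
      · cases t with
        | nil => simp
        | cons z u =>
            rw [List.getLast_cons (by simp)]
            exact le_trans ((List.pairwise_cons.1 hp).1 _ List.mem_cons_self)
              (ih (List.pairwise_cons.1 hp).2 (by simp) _ List.mem_cons_self)
      · have ht : t ≠ [] := List.ne_nil_of_mem hx'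
        rw [List.getLast_cons ht]
        exact ih (List.pairwise_cons.1 hp).2 ht _ hx'

-- the head of a ≤-sorted list is ≤ every element
lemma pv_head_le (l : List Int) (hp : l.Pairwise (fun a b => a ≤ b))
    (y x : Int) (t : List Int) (hl : l = y :: t) (hx : x ∈ l) : y ≤ x := by
  subst hl
  rcases List.mem_cons.1 hx with rfl | h
  · omega
  · exact (List.pairwise_cons.1 hp).1 _ h

-- ===== VERDICT (by name: the statement is the Claim_ definition above) =====
theorem swing_spec : Claim_equal_swing := by
  intro a _
  show swing a = swing_alt a
  simp only [swing, swing_alt, pv_fun_eq, pv_loopA a 0 0]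
  set l := PySem.List.sorted (a ++ [0]) (fun x => x) false with hl
  have hperm : l.Perm (a ++ [0]) := PySem.List.sorted_perm _ _ _
  have hne : l ≠ [] := by
    intro h; have := hperm.length_eq; simp [h] at this
  have hp : l.Pairwise (fun a b => a ≤ b) := PySem.List.sorted_pairwise _ _
  have hmem : ∀ x, x ∈ l ↔ x ∈ a ++ [0] := fun x => hperm.mem_iff
  obtain ⟨y, t, hyt⟩ := List.exists_cons_of_ne_nil hne
  obtain ⟨hMmem, hMub⟩ := pv_foldl_max_spec a 0
  obtain ⟨hmmem, hmlb⟩ := pv_foldl_min_spec a 0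
  have hmem0 : ∀ x, x ∈ (0 : Int) :: a ↔ x ∈ l := by
    intro x; rw [hmem]; simp [or_comm]
  -- last = foldl max 0
  have hlast : l.getLast hne = a.foldl max 0 := by
    apply le_antisymm
    · exact hMub _ ((hmem0 _).2 (List.getLast_mem hne))
    · exact pv_le_getLast l hp hne _ ((hmem0 _).1 hMmem)
  -- head = foldl min 0
  have hhead : y = a.foldl min 0 := by
    apply le_antisymm
    · exact pv_head_le l hp y _ t hyt ((hmem0 _).1 hmmem)
    · exact hmlb _ ((hmem0 _).2 (by simp [hyt]))
  have h0 : l[0]? = some y := by rw [hyt]; rfl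
  have hlq : l.getLast? = some (l.getLast hne) := List.getLast?_eq_some_getLast hne
  rw [PySem.List.pyGet?_neg_one, PySem.List.pyGet?_zero, h0, hlq, hlast]
  simp [hhead]
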